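-- pv_equiv track=rewrite | github.com/vermaneerajin/gedit-projects | projects/appdata.py | compare_relative
-- ===== SOURCE A (Python) =====
-- def compare_relative(p, q):
--     '''
--     >>> compare_relative('/x/y','/x/yz')
--     >>> compare_relative('/x/yz','/x/y')
--     >>> compare_relative('/x/y/a','/x/yz/a')
--     >>> compare_relative('/x/yz/a','/x/y/a')
--     >>> compare_relative('/x/y/z','/x/y')
--     1
--     >>> compare_relative('/x/y','/x/y/z')
--     -1
--     >>> compare_relative('/x/y','/x/y')
--     -1
--     >>> compare_relative('/x/y','/x/z')
--     >>> compare_relative('/x/','/x/z')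
--     -1
--     '''
--     _p = p.rstrip('/').split('/')
--     _q = q.rstrip('/').split('/')
--     for i, c in enumerate(_p):
--         try:
--             if c == _q[i]:
--                 continue
--         except IndexError:
--             return 1 # q is prefix of p
--         return None # not related
--     return -1 # p is prefix of q or equal
-- ===== SOURCE B (Python) =====
-- def compare_relative(p, q):
--     # Work on whole strings: normalise each path by stripping trailing '/'
--     # and re-appending a single '/' sentinel, then use string prefix tests
--     # (no splitting into components at all).
--     a = p.rstrip('/') + '/'
--     b = q.rstrip('/') + '/'
--     if b.startswith(a):
--         return -1  # p is prefix of q or equal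
--     if a.startswith(b):
--         return 1   # q is a proper prefix of p
--     return None    # not related
-- ===== Notes on version B (the rewrite author's own statement) =====
-- stated objective: simpler
-- what changed: B never splits the paths into components: it normalises each path by stripping trailing slashes and appending one '/' sentinel, then decides the relation with two whole-string startswith tests instead of A's per-component indexed loop with try/except IndexError.
import Mathlib
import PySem

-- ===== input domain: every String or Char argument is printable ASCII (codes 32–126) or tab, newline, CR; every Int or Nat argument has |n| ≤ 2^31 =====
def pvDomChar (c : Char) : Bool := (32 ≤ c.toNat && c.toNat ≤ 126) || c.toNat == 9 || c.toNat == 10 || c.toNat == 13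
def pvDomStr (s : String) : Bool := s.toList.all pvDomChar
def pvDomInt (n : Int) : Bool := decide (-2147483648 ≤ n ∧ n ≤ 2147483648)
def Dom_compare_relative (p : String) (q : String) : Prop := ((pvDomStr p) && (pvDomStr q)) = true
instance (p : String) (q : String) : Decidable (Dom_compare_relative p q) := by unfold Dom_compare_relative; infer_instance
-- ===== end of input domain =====

-- B drops the component split entirely: it normalises each path (rstrip '/' + one '/'
-- sentinel) and decides the relation with two whole-string startswith tests (objective: simpler).


-- s.rstrip('/'): drop all trailing '/' characters (exact: the chars argument is the
-- single character '/'); both Pythons contain this very expression.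
def pvRstripSlash (s : String) : List Char := (s.toList.reverse.dropWhile (· == '/')).reverse

-- ===== PORT A =====
-- the 'for i, c in enumerate(_p)' loop: pyGet? _q i = none is the IndexError branch
def pvLoopA : List (List Char) → Int → List (List Char) → Option Int
  | [], _, _ => some (-1)          -- p is prefix of q or equal
  | c :: rest, i, q =>
    match PySem.List.pyGet? q i with
    | none => some 1               -- IndexError: q is prefix of p
    | some c' => if c == c' then pvLoopA rest (i + 1) q else none

def compare_relative (p : String) (q : String) : Option Int :=
  pvLoopA (PySem.Chars.splitOn (pvRstripSlash p) ['/']) 0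
          (PySem.Chars.splitOn (pvRstripSlash q) ['/'])

-- ===== PORT B =====
def compare_relative_alt (p : String) (q : String) : Option Int :=
  let a := pvRstripSlash p ++ ['/']
  let b := pvRstripSlash q ++ ['/']
  if PySem.Chars.startswith b a then some (-1)      -- p is prefix of q or equal
  else if PySem.Chars.startswith a b then some 1    -- q is a proper prefix of p
  else none                                         -- not related

-- ===== PRECONDITION & SPEC =====
def Spec_compare_relative (p : String) (q : String) (out : Option Int) : Prop := out = compare_relative_alt p q
instance (p : String) (q : String) (out : Option Int) : Decidable (Spec_compare_relative p q out) := by unfold Spec_compare_relative; infer_instance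

-- ===== CLAIM (what is proved, stated in full; the proofs are below) =====
def Claim_equal_compare_relative : Prop := ∀ (p : String) (q : String), Dom_compare_relative p q → Spec_compare_relative p q (compare_relative p q)

-- ===== LEMMAS AND PROOFS =====

-- a fuel-free description of splitting on the single character '/'
def pvSplitSlash : List Char → List (List Char)
  | [] => [[]]
  | c :: t => if c = '/' then [] :: pvSplitSlash t else (pvSplitSlash t).modifyHead (c :: ·)

theorem pvSplitSlash_ne_nil (l : List Char) : pvSplitSlash l ≠ [] := by
  cases l with
  | nil => simp [pvSplitSlash]
  | cons c t =>
    simp only [pvSplitSlash]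
    split
    · simp
    · cases h : pvSplitSlash t with
      | nil => exact absurd h (pvSplitSlash_ne_nil t)
      | cons a b => simp

theorem pvSplitOn_go (fuel : Nat) (l cur : List Char) (acc : List (List Char))
    (h : l.length < fuel) :
    PySem.Chars.splitOn.go ['/'] fuel l cur acc
      = acc.reverse ++ (pvSplitSlash l).modifyHead (cur.reverse ++ ·) := by
  induction fuel generalizing l cur acc with
  | zero => omega
  | succ f ih =>
    cases l with
    | nil => simp [PySem.Chars.splitOn.go, pvSplitSlash]
    | cons c rest =>
      simp only [PySem.Chars.splitOn.go, List.isPrefixOf, List.length_cons] at *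
      by_cases hc : c = '/'
      · rw [if_pos (by simp [hc])]
        simp only [List.length_nil, List.drop_succ_cons, List.drop_zero]
        rw [ih rest [] (cur.reverse :: acc) (by omega)]
        cases hs : pvSplitSlash rest with
        | nil => exact absurd hs (pvSplitSlash_ne_nil rest)
        | cons a b => simp [pvSplitSlash, hc, hs]
      · rw [if_neg (by simp [Ne.symm hc])]
        rw [ih rest (c :: cur) acc (by omega)]
        cases hs : pvSplitSlash rest with
        | nil => exact absurd hs (pvSplitSlash_ne_nil rest)
        | cons a b => simp [pvSplitSlash, hc, hs]

theorem pvSplitOn_eq (l : List Char) :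
    PySem.Chars.splitOn l ['/'] = pvSplitSlash l := by
  rw [PySem.Chars.splitOn, pvSplitOn_go (l.length + 1) l [] [] (by omega)]
  cases h : pvSplitSlash l with
  | nil => exact absurd h (pvSplitSlash_ne_nil l)
  | cons a b => simp

-- component-list prefix order coincides with string prefix order after the '/' sentinel
theorem pvSplit_prefix_iff (a b : List Char) :
    pvSplitSlash a <+: pvSplitSlash b ↔ (a ++ ['/']) <+: (b ++ ['/']) := by
  induction a generalizing b with
  | nil =>
    cases b with
    | nil => simp [pvSplitSlash]
    | cons y b' =>
      by_cases hy : y = '/'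
      · simp [pvSplitSlash, hy, List.cons_prefix_cons]
      · cases hs : pvSplitSlash b' with
        | nil => exact absurd hs (pvSplitSlash_ne_nil b')
        | cons h t => simp [pvSplitSlash, hy, hs, List.cons_prefix_cons, Ne.symm hy]
  | cons x a' ih =>
    cases b with
    | nil =>
      by_cases hx : x = '/'
      · simp [pvSplitSlash, hx, List.cons_prefix_cons, pvSplitSlash_ne_nil a']
      · cases hs : pvSplitSlash a' with
        | nil => exact absurd hs (pvSplitSlash_ne_nil a')
        | cons h t => simp [pvSplitSlash, hx, hs, List.cons_prefix_cons]
    | cons y b' =>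
      by_cases hx : x = '/' <;> by_cases hy : y = '/'
      · subst hx hy
        simpa [pvSplitSlash, List.cons_prefix_cons] using ih b'
      · cases hs : pvSplitSlash b' with
        | nil => exact absurd hs (pvSplitSlash_ne_nil b')
        | cons h t => simp [pvSplitSlash, hx, hy, hs, List.cons_prefix_cons, Ne.symm hy]
      · cases hs : pvSplitSlash a' with
        | nil => exact absurd hs (pvSplitSlash_ne_nil a')
        | cons h t => simp [pvSplitSlash, hx, hy, hs, List.cons_prefix_cons]
      · cases hsa : pvSplitSlash a' with
        | nil => exact absurd hsa (pvSplitSlash_ne_nil a')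
        | cons h t =>
          cases hsb : pvSplitSlash b' with
          | nil => exact absurd hsb (pvSplitSlash_ne_nil b')
          | cons h' t' =>
            have key := ih b'
            rw [hsa, hsb] at key
            rw [show pvSplitSlash (x :: a') = (x :: h) :: t by simp [pvSplitSlash, hx, hsa],
                show pvSplitSlash (y :: b') = (y :: h') :: t' by simp [pvSplitSlash, hy, hsb]]
            simp only [List.cons_append, List.cons_prefix_cons]
            constructor
            · rintro ⟨he, ht⟩
              obtain ⟨h1, h2⟩ := List.cons.inj he
              exact ⟨h1, key.mp (List.cons_prefix_cons.mpr ⟨h2, ht⟩)⟩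
            · rintro ⟨hxy, hrest⟩
              obtain ⟨hh, ht⟩ := List.cons_prefix_cons.mp (key.mpr hrest)
              exact ⟨by rw [hxy, hh], ht⟩

-- A's loop, indexing q from position k, only sees q.drop k
theorem pvLoopA_drop (ps : List (List Char)) (k : Nat) (qs : List (List Char)) :
    pvLoopA ps (k : Int) qs = pvLoopA ps 0 (qs.drop k) := by
  induction ps generalizing k qs with
  | nil => rfl
  | cons c rest ih =>
    have hget : PySem.List.pyGet? qs (k : Int) = (qs.drop k)[0]? := by
      simp [PySem.List.pyGet?_natCast, List.getElem?_drop]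
    cases hq : qs.drop k with
    | nil =>
      simp only [pvLoopA, hget, hq, List.getElem?_nil]
      simp [PySem.List.pyGet?, PySem.List.pyIdx?]
    | cons r rs =>
      have h0 : PySem.List.pyGet? (r :: rs) (0 : Int) = some r := by
        simp [PySem.List.pyGet?, PySem.List.pyIdx?]
      simp only [pvLoopA, hget, hq, List.getElem?_cons_zero, h0]
      by_cases hc : c == r
      · have hcast : ((k : Int) + 1) = ((k + 1 : Nat) : Int) := by push_cast; ring
        have hdrop : qs.drop (k + 1) = rs := by
          have h := List.drop_drop (i := 1) (j := k) (l := qs)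
          rw [hq] at h
          simpa [Nat.add_comm] using h.symm
        have h1 : pvLoopA rest ((0 : Int) + 1) (r :: rs) = pvLoopA rest 0 rs := by
          have := ih 1 (r :: rs)
          simpa using this
        simp only [hc, if_true, hcast, ih, hdrop, h1]
      · simp [hc]

-- A's loop from index 0 is the two-sided prefix test on the component lists
theorem pvLoopA_eq_prefix (ps qs : List (List Char)) :
    pvLoopA ps 0 qs =
      (if ps <+: qs then some (-1) else if qs <+: ps then some 1 else none) := by
  induction ps generalizing qs with
  | nil => simp [pvLoopA]
  | cons c rest ih =>
    cases qs with
    | nil => simp [pvLoopA, PySem.List.pyGet?, PySem.List.pyIdx?]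
    | cons r rs =>
      have h0 : PySem.List.pyGet? (r :: rs) (0 : Int) = some r := by
        simp [PySem.List.pyGet?, PySem.List.pyIdx?]
      simp only [pvLoopA, h0]
      by_cases hc : c == r
      · have hcr : c = r := by simpa using hc
        have h1 : pvLoopA rest ((0 : Int) + 1) (r :: rs) = pvLoopA rest 0 rs := by
          have := pvLoopA_drop rest 1 (r :: rs)
          simpa using this
        rw [hc, if_pos rfl, h1, ih rs]
        simp [hcr, List.cons_prefix_cons]
      · have hcr : c ≠ r := by simpa using hc
        simp [hc, List.cons_prefix_cons, hcr, Ne.symm hcr]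

-- ===== VERDICT (by name: the statement is the Claim_ definition above) =====
theorem compare_relative_spec : Claim_equal_compare_relative := by
  intro p q _
  unfold Spec_compare_relative compare_relative compare_relative_alt
  rw [pvSplitOn_eq, pvSplitOn_eq, pvLoopA_eq_prefix]
  by_cases h1 : (pvRstripSlash p ++ ['/']) <+: (pvRstripSlash q ++ ['/'])
  · rw [if_pos ((pvSplit_prefix_iff _ _).mpr h1)]
    simp [(PySem.Chars.startswith_iff _ _).mpr h1]
  · rw [if_neg (fun h => h1 ((pvSplit_prefix_iff _ _).mp h))]
    have hb1 : PySem.Chars.startswith (pvRstripSlash q ++ ['/']) (pvRstripSlash p ++ ['/']) = false := by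
      cases hs : PySem.Chars.startswith (pvRstripSlash q ++ ['/']) (pvRstripSlash p ++ ['/'])
      · rfl
      · exact absurd ((PySem.Chars.startswith_iff _ _).mp hs) h1
    by_cases h2 : (pvRstripSlash q ++ ['/']) <+: (pvRstripSlash p ++ ['/'])
    · rw [if_pos ((pvSplit_prefix_iff _ _).mpr h2)]
      simp [hb1, (PySem.Chars.startswith_iff _ _).mpr h2]
    · rw [if_neg (fun h => h2 ((pvSplit_prefix_iff _ _).mp h))]
      have hb2 : PySem.Chars.startswith (pvRstripSlash p ++ ['/']) (pvRstripSlash q ++ ['/']) = false := by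
        cases hs : PySem.Chars.startswith (pvRstripSlash p ++ ['/']) (pvRstripSlash q ++ ['/'])
        · rfl
        · exact absurd ((PySem.Chars.startswith_iff _ _).mp hs) h2
      simp [hb1, hb2]
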